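-- pv_equiv track=rewrite | github.com/alexandra-farion/CFB | assets/scripts/atomic_calculator.py | orbitals
-- ===== SOURCE A (Python) =====
-- rule_orbitals = ['S', 'p', 'd', 'f']
--
-- def orbitals(n_e, level):
--     formula = ''
--     level = str(level)
--
--     count = 0
--     for i in range(4):
--         formula += level + rule_orbitals[i] + ' '
--         n_e -= 2 + count
--         if n_e <= 0:
--             break
--         count += 4
--
--     return formula
-- ===== SOURCE B (Python) =====
-- rule_orbitals = ['S', 'p', 'd', 'f']
--
-- def orbitals(n_e, level):
--     # shell count first (smallest cumulative capacity >= n_e, capped at 4), then render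
--     k = 4
--     for i, cap in enumerate([2, 8, 18, 32]):
--         if n_e <= cap:
--             k = i + 1
--             break
--     return ''.join(str(level) + rule_orbitals[i] + ' ' for i in range(k))
-- ===== Notes on version B (the rewrite author's own statement) =====
-- stated objective: alternative
-- what changed: B first computes the shell count k from a cumulative-capacity table [2,8,18,32] and then renders the string in one join over range(k), instead of A's single loop interleaving subtraction, appending and break.
import Mathlib
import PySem

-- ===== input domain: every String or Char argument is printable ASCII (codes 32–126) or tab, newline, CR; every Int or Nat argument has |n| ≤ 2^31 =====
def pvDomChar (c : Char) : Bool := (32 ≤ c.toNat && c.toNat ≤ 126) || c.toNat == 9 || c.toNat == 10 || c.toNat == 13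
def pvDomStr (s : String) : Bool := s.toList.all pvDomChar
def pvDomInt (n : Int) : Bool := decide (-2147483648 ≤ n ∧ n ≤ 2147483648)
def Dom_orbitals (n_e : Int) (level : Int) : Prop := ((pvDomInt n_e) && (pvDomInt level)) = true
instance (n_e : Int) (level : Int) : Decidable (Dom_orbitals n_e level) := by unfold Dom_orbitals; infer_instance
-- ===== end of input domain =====

-- B separates counting the shells (cumulative-capacity table) from rendering the string; same O(1) cost (objective: alternative).

-- ===== PORT A =====
def rule_orbitals : List String := ["S", "p", "d", "f"]

-- A's for-loop with break, as structural recursion over the range list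
def orbitalsLoopA : List Int → String → String → Int → Int → String
  | [], formula, _, _, _ => formula
  | i :: rest, formula, levelS, n_e, count =>
    let formula := formula ++ levelS ++ ((PySem.List.pyGet? rule_orbitals i).getD "") ++ " "
    let n_e := n_e - (2 + count)
    if n_e ≤ 0 then formula
    else orbitalsLoopA rest formula levelS n_e (count + 4)

def orbitals (n_e : Int) (level : Int) : String :=
  orbitalsLoopA (PySem.List.pyRange 0 4 1) "" (PySem.Int.toStr level) n_e 0

-- ===== PORT B =====
-- B's enumerate-with-break loop finding the shell count k
def orbitalsFindK : List (Int × Int) → Int → Int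
  | [], _ => 4
  | (i, cap) :: rest, n_e => if n_e ≤ cap then i + 1 else orbitalsFindK rest n_e

def orbitals_alt (n_e : Int) (level : Int) : String :=
  let k := orbitalsFindK (PySem.List.enumerate [(2 : Int), 8, 18, 32]) n_e
  String.join ((PySem.List.pyRange 0 k 1).map
    (fun i => PySem.Int.toStr level ++ ((PySem.List.pyGet? rule_orbitals i).getD "") ++ " "))

-- ===== PRECONDITION & SPEC =====
def Spec_orbitals (n_e : Int) (level : Int) (out : String) : Prop := out = orbitals_alt n_e level
instance (n_e : Int) (level : Int) (out : String) : Decidable (Spec_orbitals n_e level out) := by unfold Spec_orbitals; infer_instance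

-- ===== CLAIM (what is proved, stated in full; the proofs are below) =====
def Claim_equal_orbitals : Prop := ∀ (n_e : Int) (level : Int), Dom_orbitals n_e level → Spec_orbitals n_e level (orbitals n_e level)

-- ===== LEMMAS AND PROOFS =====

-- ===== VERDICT (by name: the statement is the Claim_ definition above) =====
theorem orbitals_spec : Claim_equal_orbitals := by
  intro n_e level _
  unfold Spec_orbitals orbitals orbitals_alt
  rw [show PySem.List.pyRange 0 4 1 = [0, 1, 2, 3] from by decide]
  simp only [orbitalsLoopA, orbitalsFindK, PySem.List.enumerate_cons, PySem.List.enumerate_nil]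
  split_ifs <;>
    first
      | omega
      | simp [PySem.List.pyRange_one, String.join, rule_orbitals,
              PySem.List.pyGet?, PySem.List.pyIdx?, List.range_succ, String.append_assoc]
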